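-- pv_equiv track=rewrite | github.com/bwgriffiths1/streamlit-oauth-demo | v2_pages/ingest_meeting.py | _match_committee
-- ===== SOURCE A (Python) =====
-- def _match_committee(raw_name: str, meeting_types: list[dict]) -> str | None:
--     """Match a free-text committee name to a known meeting_type short_name."""
--     if not raw_name:
--         return None
--     raw_lower = raw_name.lower()
--     # Exact name match
--     for t in meeting_types:
--         if t["name"].lower() == raw_lower:
--             return t["short_name"]
--     # Exact short_name match
--     for t in meeting_types:
--         if t["short_name"].lower() == raw_lower:
--             return t["short_name"]
--     # DB name is a substring of the raw name (e.g. "Markets Committee" in "Markets Committee Meeting")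
--     for t in meeting_types:
--         if t["name"].lower() in raw_lower:
--             return t["short_name"]
--     # Short name appears in raw name
--     for t in meeting_types:
--         if t["short_name"].lower() in raw_lower.split():
--             return t["short_name"]
--     return None
-- ===== SOURCE B (Python) =====
-- def _match_committee(raw_name: str, meeting_types: list[dict]) -> str | None:
--     """Match a free-text committee name to a known meeting_type short_name.
--
--     Single pass: rank each meeting type by match tier (0 exact name, 1 exact
--     short_name, 2 name substring, 3 short_name word) and keep the earliest
--     best-ranked one (strict improvement only)."""
--     if not raw_name:
--         return None
--     raw_lower = raw_name.lower()
--     words = raw_lower.split()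
--     best_rank = 4
--     best = None
--     for t in meeting_types:
--         name = t["name"].lower()
--         short = t["short_name"]
--         short_lower = short.lower()
--         if name == raw_lower:
--             rank = 0
--         elif short_lower == raw_lower:
--             rank = 1
--         elif name in raw_lower:
--             rank = 2
--         elif short_lower in words:
--             rank = 3
--         else:
--             rank = 4
--         if rank < best_rank:
--             best_rank = rank
--             best = short
--     return best
-- ===== Notes on version B (the rewrite author's own statement) =====
-- stated objective: alternative
-- what changed: Replaced A's four sequential scans (one per match tier, with raw_lower.split() recomputed inside the last scan) by a single pass that ranks each meeting type 0-4 and keeps the earliest strictly-best-ranked short_name, with words split once.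
-- outside the precondition, e.g. on _match_committee('x', [{'name': 'x', 'short_name': 'X'}, {}]): A returns 'X', B raises KeyError
import Mathlib
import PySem

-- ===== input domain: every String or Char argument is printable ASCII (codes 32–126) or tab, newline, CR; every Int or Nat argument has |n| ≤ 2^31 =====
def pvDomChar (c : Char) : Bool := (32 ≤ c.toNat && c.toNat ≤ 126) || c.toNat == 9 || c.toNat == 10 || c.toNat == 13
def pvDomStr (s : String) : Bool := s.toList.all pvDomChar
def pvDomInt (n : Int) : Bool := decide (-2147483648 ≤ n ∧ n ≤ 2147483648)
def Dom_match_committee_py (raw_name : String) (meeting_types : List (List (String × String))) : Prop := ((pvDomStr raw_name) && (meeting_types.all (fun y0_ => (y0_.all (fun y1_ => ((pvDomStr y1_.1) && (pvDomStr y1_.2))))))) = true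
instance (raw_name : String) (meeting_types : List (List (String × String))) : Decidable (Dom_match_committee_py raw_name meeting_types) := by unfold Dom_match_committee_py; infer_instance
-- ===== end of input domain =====

-- B replaces A's four sequential tier scans by a single ranked pass; equivalence of the two is proved on all inputs where no dict lacks a required key.

-- ===== PORT A =====
-- t[k] on the assoc-list dict t (first match); a missing key is Python's KeyError, excluded by Pre_, so the getD "" default is never observed there
def pvGetKey (t : List (String × String)) (k : String) : String :=
  ((PySem.Dict.mk t).get? k).getD ""

def match_committee_py (raw_name : String) (meeting_types : List (List (String × String))) : Option String :=
  if raw_name == "" then none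
  else
    let raw_lower := PySem.Str.lower raw_name
    match meeting_types.find? (fun t => PySem.Str.lower (pvGetKey t "name") == raw_lower) with
    | some t => some (pvGetKey t "short_name")
    | none =>
    match meeting_types.find? (fun t => PySem.Str.lower (pvGetKey t "short_name") == raw_lower) with
    | some t => some (pvGetKey t "short_name")
    | none =>
    match meeting_types.find? (fun t => PySem.Str.isIn (PySem.Str.lower (pvGetKey t "name")) raw_lower) with
    | some t => some (pvGetKey t "short_name")
    | none =>
    match meeting_types.find? (fun t => (PySem.Str.split₀ raw_lower).contains (PySem.Str.lower (pvGetKey t "short_name"))) with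
    | some t => some (pvGetKey t "short_name")
    | none => none

-- ===== PORT B =====
def match_committee_py_alt (raw_name : String) (meeting_types : List (List (String × String))) : Option String :=
  if raw_name == "" then none
  else
    let raw_lower := PySem.Str.lower raw_name
    let words := PySem.Str.split₀ raw_lower
    (meeting_types.foldl (fun (acc : Nat × Option String) t =>
        let name := PySem.Str.lower (pvGetKey t "name")
        let short := pvGetKey t "short_name"
        let short_lower := PySem.Str.lower short
        let rank : Nat :=
          if name == raw_lower then 0
          else if short_lower == raw_lower then 1
          else if PySem.Str.isIn name raw_lower then 2
          else if words.contains short_lower then 3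
          else 4
        if rank < acc.1 then (rank, some short) else acc) ((4 : Nat), (none : Option String))).2

-- ===== PRECONDITION & SPEC =====
-- Pre_ excludes nonempty raw_name with some dict missing the "name" or "short_name" key: Python A raises KeyError there in almost all cases; the rare such inputs on which A still returns (an earlier dict matched before the malformed one was reached) are excluded too because B naturally raises on them (see claim cites).
def Pre_match_committee_py (raw_name : String) (meeting_types : List (List (String × String))) : Prop :=
  raw_name = "" ∨ ∀ t ∈ meeting_types,
    ((PySem.Dict.mk t).get? "name").isSome = true ∧ ((PySem.Dict.mk t).get? "short_name").isSome = true
instance (raw_name : String) (meeting_types : List (List (String × String))) : Decidable (Pre_match_committee_py raw_name meeting_types) := by unfold Pre_match_committee_py; infer_instance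

def pvWitness_match_committee_py : String × (List (List (String × String))) :=
  ("Markets Committee Meeting", [[("name", "Markets Committee"), ("short_name", "markets")], [("name", "Audit"), ("short_name", "audit")]])

def Spec_match_committee_py (raw_name : String) (meeting_types : List (List (String × String))) (out : Option String) : Prop := out = match_committee_py_alt raw_name meeting_types
instance (raw_name : String) (meeting_types : List (List (String × String))) (out : Option String) : Decidable (Spec_match_committee_py raw_name meeting_types out) := by unfold Spec_match_committee_py; infer_instance

-- ===== CLAIM (what is proved, stated in full; the proofs are below) =====
def Claim_equal_match_committee_py : Prop := ∀ (raw_name : String) (meeting_types : List (List (String × String))), Dom_match_committee_py raw_name meeting_types → Pre_match_committee_py raw_name meeting_types → Spec_match_committee_py raw_name meeting_types (match_committee_py raw_name meeting_types)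

-- ===== LEMMAS AND PROOFS =====

-- the j-th tier condition of A (j = 0..3), on a fixed lowered raw name
def pvCond (rl : String) (j : Nat) (t : List (String × String)) : Bool :=
  match j with
  | 0 => PySem.Str.lower (pvGetKey t "name") == rl
  | 1 => PySem.Str.lower (pvGetKey t "short_name") == rl
  | 2 => PySem.Str.isIn (PySem.Str.lower (pvGetKey t "name")) rl
  | 3 => (PySem.Str.split₀ rl).contains (PySem.Str.lower (pvGetKey t "short_name"))
  | _ => false

-- B's rank of a meeting type: the lowest tier whose condition holds, 4 if none
def pvRank (rl : String) (t : List (String × String)) : Nat :=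
  if pvCond rl 0 t then 0 else if pvCond rl 1 t then 1
  else if pvCond rl 2 t then 2 else if pvCond rl 3 t then 3 else 4

-- A's single tier scan
def pvScan (rl : String) (j : Nat) (ts : List (List (String × String))) : Option String :=
  (ts.find? (pvCond rl j)).map (fun t => pvGetKey t "short_name")

-- A's first r tier scans chained
def pvChain (rl : String) : Nat → List (List (String × String)) → Option String
  | 0, _ => none
  | (j+1), ts => (pvChain rl j ts).or (pvScan rl j ts)

-- B's fold step
def pvStep (rl : String) (acc : Nat × Option String) (t : List (String × String)) : Nat × Option String :=
  if pvRank rl t < acc.1 then (pvRank rl t, some (pvGetKey t "short_name")) else acc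

lemma pvCond_false_of_lt_rank (rl : String) (t : List (String × String)) :
    ∀ j < pvRank rl t, pvCond rl j t = false := by
  intro j hj
  unfold pvRank at hj
  split_ifs at hj with h0 h1 h2 h3 <;>
    (interval_cases j <;> simp_all)

lemma pvCond_rank (rl : String) (t : List (String × String)) (h : pvRank rl t < 4) :
    pvCond rl (pvRank rl t) t = true := by
  unfold pvRank at *
  split_ifs at * <;> simp_all

lemma pvChain_nil (rl : String) (r : Nat) : pvChain rl r [] = none := by
  induction r with
  | zero => rfl
  | succ j ih => simp [pvChain, pvScan, ih]

lemma pvChain_cons_skip (rl : String) (t : List (String × String))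
    (ts : List (List (String × String))) (r : Nat)
    (h : ∀ j < r, pvCond rl j t = false) :
    pvChain rl r (t :: ts) = pvChain rl r ts := by
  induction r with
  | zero => rfl
  | succ j ih =>
    have hj : pvCond rl j t = false := h j (Nat.lt_succ_self j)
    simp only [pvChain, pvScan,
      List.find?_cons_of_neg (p := pvCond rl j) (show ¬ pvCond rl j t = true by simp [hj])]
    rw [ih (fun i hi => h i (Nat.lt_succ_of_lt hi))]

lemma pvChain_cons_hit (rl : String) (t : List (String × String))
    (ts : List (List (String × String))) (r : Nat) (hr : r ≤ 4)
    (h : pvRank rl t < r) :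
    pvChain rl r (t :: ts) = (pvChain rl (pvRank rl t) ts).or (some (pvGetKey t "short_name")) := by
  induction r with
  | zero => omega
  | succ j ih =>
    by_cases hlt : pvRank rl t < j
    · rw [pvChain, ih (by omega) hlt, Option.or_assoc, Option.some_or]
    · have heq : pvRank rl t = j := by omega
      rw [pvChain, pvChain_cons_skip rl t ts j (by
        intro i hi
        exact pvCond_false_of_lt_rank rl t i (by omega))]
      have hc : pvCond rl j t = true := by
        rw [← heq]; exact pvCond_rank rl t (by omega)
      simp only [pvScan, List.find?_cons_of_pos hc, Option.map_some, heq]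

lemma pvFold_eq_chain (rl : String) (ts : List (List (String × String))) :
    ∀ (r : Nat) (s : Option String), r ≤ 4 →
    (ts.foldl (pvStep rl) (r, s)).2 = (pvChain rl r ts).or s := by
  induction ts with
  | nil => intro r s _; simp [pvChain_nil]
  | cons t ts ih =>
    intro r s hr
    by_cases h : pvRank rl t < r
    · have : pvStep rl (r, s) t = (pvRank rl t, some (pvGetKey t "short_name")) := by
        simp [pvStep, h]
      rw [List.foldl_cons, this, ih _ _ (by omega),
        pvChain_cons_hit rl t ts r hr h, Option.or_assoc, Option.some_or]
    · have : pvStep rl (r, s) t = (r, s) := by simp [pvStep, h]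
      rw [List.foldl_cons, this, ih _ _ hr,
        pvChain_cons_skip rl t ts r (fun j hj =>
          pvCond_false_of_lt_rank rl t j (by omega))]

-- A's nested matches are the chain of the four scans
lemma pvA_eq_chain (raw_name : String) (mts : List (List (String × String)))
    (h : (raw_name == "") = false) :
    match_committee_py raw_name mts = pvChain (PySem.Str.lower raw_name) 4 mts := by
  have hch : pvChain (PySem.Str.lower raw_name) 4 mts =
      (((pvScan (PySem.Str.lower raw_name) 0 mts).or
        (pvScan (PySem.Str.lower raw_name) 1 mts)).or
        (pvScan (PySem.Str.lower raw_name) 2 mts)).or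
        (pvScan (PySem.Str.lower raw_name) 3 mts) := by
    simp [pvChain, Option.none_or]
  rw [hch]
  unfold match_committee_py
  rw [if_neg (by simp_all)]
  have e0 : pvCond (PySem.Str.lower raw_name) 0 = (fun t => PySem.Str.lower (pvGetKey t "name") == PySem.Str.lower raw_name) := by funext t; rfl
  have e1 : pvCond (PySem.Str.lower raw_name) 1 = (fun t => PySem.Str.lower (pvGetKey t "short_name") == PySem.Str.lower raw_name) := by funext t; rfl
  have e2 : pvCond (PySem.Str.lower raw_name) 2 = (fun t => PySem.Str.isIn (PySem.Str.lower (pvGetKey t "name")) (PySem.Str.lower raw_name)) := by funext t; rfl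
  have e3 : pvCond (PySem.Str.lower raw_name) 3 = (fun t => (PySem.Str.split₀ (PySem.Str.lower raw_name)).contains (PySem.Str.lower (pvGetKey t "short_name"))) := by funext t; rfl
  simp only [pvScan, e0, e1, e2, e3]
  rcases h0 : mts.find? (fun t => PySem.Str.lower (pvGetKey t "name") == PySem.Str.lower raw_name) with _ | t0
  · rcases h1 : mts.find? (fun t => PySem.Str.lower (pvGetKey t "short_name") == PySem.Str.lower raw_name) with _ | t1
    · rcases h2 : mts.find? (fun t => PySem.Str.isIn (PySem.Str.lower (pvGetKey t "name")) (PySem.Str.lower raw_name)) with _ | t2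
      · rcases h3 : mts.find? (fun t => (PySem.Str.split₀ (PySem.Str.lower raw_name)).contains (PySem.Str.lower (pvGetKey t "short_name"))) with _ | t3 <;>
          simp
      · simp
    · simp
  · simp

lemma pvB_eq_fold (raw_name : String) (mts : List (List (String × String)))
    (h : (raw_name == "") = false) :
    match_committee_py_alt raw_name mts =
      (mts.foldl (pvStep (PySem.Str.lower raw_name)) ((4 : Nat), (none : Option String))).2 := by
  unfold match_committee_py_alt
  rw [if_neg (by simp_all)]
  rfl

-- ===== VERDICT (by name: the statement is the Claim_ definition above) =====
theorem match_committee_py_spec : Claim_equal_match_committee_py := by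
  intro raw_name mts _ _
  unfold Spec_match_committee_py
  by_cases h : raw_name = ""
  · subst h; rfl
  · have hb : (raw_name == "") = false := by simpa using h
    rw [pvA_eq_chain raw_name mts hb, pvB_eq_fold raw_name mts hb,
      pvFold_eq_chain _ mts 4 none (le_refl 4), Option.or_none]
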